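-- pv_equiv track=rewrite | github.com/DrDomenicoMarson/PoreMS | porems/store.py | _encode_pure
-- ===== SOURCE A (Python) =====
-- def _encode_pure(digits, value, width):
--     """Encode one non-negative integer in a fixed-width positional alphabet.
--
--     Parameters
--     ----------
--     digits : str
--         Digits used by the positional numeral system.
--     value : int
--         Non-negative integer to encode.
--     width : int
--         Output width in characters.
--
--     Returns
--     -------
--     token : str
--         Encoded value padded to ``width`` characters.
--
--     Raises
--     ------
--     ValueError
--         Raised when ``value`` is negative or does not fit in ``width``
--         characters for the selected alphabet.
--     """
--     if value < 0:
--         raise ValueError("Encoded values must be non-negative.")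
--
--     base = len(digits)
--     buffer = ["0"] * width
--     remainder = value
--     for index in range(width - 1, -1, -1):
--         buffer[index] = digits[remainder % base]
--         remainder //= base
--
--     if remainder != 0:
--         raise ValueError(f"Value {value} does not fit in width {width}.")
--
--     return "".join(buffer)
-- ===== SOURCE B (Python) =====
-- def _encode_pure(digits, value, width):
--     """Encode one non-negative integer in a fixed-width positional alphabet.
--
--     Builds the minimal digit string with a divide loop, then left-pads
--     with the alphabet's zero digit (digits[0]) to the requested width.
--     """
--     if value < 0:
--         raise ValueError("Encoded values must be non-negative.")
--
--     base = len(digits)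
--     rev = []
--     remainder = value
--     while remainder:
--         rev.append(digits[remainder % base])
--         remainder //= base
--
--     if len(rev) > width:
--         raise ValueError(f"Value {value} does not fit in width {width}.")
--
--     rev.extend(digits[0] * (width - len(rev)))
--     return "".join(reversed(rev))
-- ===== Notes on version B (the rewrite author's own statement) =====
-- stated objective: alternative
-- what changed: A fills a fixed-width buffer back-to-front with exactly width divide steps; B extracts only the minimal digits with a while loop (O(log_base value) steps), checks the fit by length, and left-pads in bulk with the alphabet's zero digit.
-- outside the precondition, e.g. on _encode_pure('', 0, 0): A returns '', B raises IndexError; on _encode_pure('01', 0, -1): A returns '', B raises ValueError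
import Mathlib
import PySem

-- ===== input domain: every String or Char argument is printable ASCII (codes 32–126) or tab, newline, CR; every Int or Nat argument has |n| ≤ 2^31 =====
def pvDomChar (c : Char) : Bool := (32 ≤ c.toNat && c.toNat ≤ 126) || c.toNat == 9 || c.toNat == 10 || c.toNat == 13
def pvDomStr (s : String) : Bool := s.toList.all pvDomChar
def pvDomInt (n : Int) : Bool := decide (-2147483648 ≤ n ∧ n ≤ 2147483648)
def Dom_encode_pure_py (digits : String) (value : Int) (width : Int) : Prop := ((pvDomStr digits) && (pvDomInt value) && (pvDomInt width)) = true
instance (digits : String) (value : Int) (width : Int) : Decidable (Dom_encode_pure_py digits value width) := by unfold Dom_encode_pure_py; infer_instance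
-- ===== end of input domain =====

-- B replaces A's fixed-width back-to-front buffer fill (exactly `width` divide steps)
-- by a minimal-digit while loop with length check and left-padding (objective: alternative).


-- ===== PORT A =====
-- literal transliteration of A: buffer of `width` zeros, for index in range(width-1,-1,-1)
-- write digits[remainder % base] and floor-divide; raise paths (excluded by Pre_) return "".
def encode_pure_py (digits : String) (value : Int) (width : Int) : String :=
  if value < 0 then ""  -- raise ValueError (outside Pre_)
  else
    let base : Int := PySem.Str.len digits
    let st :=
      (PySem.List.pyRange (width - 1) (-1) (-1)).foldl
        (fun (st : List Char × Int) idx =>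
          (st.1.set idx.toNat ((PySem.Str.pyGet? digits (PySem.Int.mod st.2 base)).getD '0'),
           PySem.Int.floordiv st.2 base))
        (List.replicate width.toNat '0', value)
    if st.2 ≠ 0 then ""  -- raise ValueError (outside Pre_)
    else String.ofList st.1

-- ===== PORT B =====
-- termination fact for B's while loop (cited by `decreasing_by`)
theorem pvFdivLt (rem base : Int) (h2 : 2 ≤ base) (h0 : 0 < rem) :
    (PySem.Int.floordiv rem base).toNat < rem.toNat := by
  rw [PySem.Int.floordiv_eq_ediv_of_pos (by omega)]
  have h1 : 0 ≤ rem / base := Int.ediv_nonneg (by omega) (by omega)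
  have h3 : rem / base < rem := by
    rw [Int.ediv_lt_iff_lt_mul (by omega)]
    nlinarith
  omega

-- Python's `while remainder:` loop, collecting the appended characters in order
-- (LSB first); the `2 ≤ base` guard only makes the recursion total — on base ≤ 1
-- with positive remainder the Python loop diverges or raises (outside Pre_).
def pvDigitsLoop (digits : String) (base rem : Int) : List Char :=
  if h : 2 ≤ base ∧ 0 < rem then
    (PySem.Str.pyGet? digits (PySem.Int.mod rem base)).getD '0' ::
      pvDigitsLoop digits base (PySem.Int.floordiv rem base)
  else []
termination_by rem.toNat
decreasing_by exact pvFdivLt rem base h.1 h.2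

def encode_pure_py_alt (digits : String) (value : Int) (width : Int) : String :=
  if value < 0 then ""  -- raise ValueError (outside Pre_)
  else
    let base : Int := PySem.Str.len digits
    let rev := pvDigitsLoop digits base value
    if (rev.length : Int) > width then ""  -- raise ValueError (outside Pre_)
    else
      let padded := rev ++ List.replicate (width - (rev.length : Int)).toNat
                            ((PySem.Str.pyGet? digits 0).getD '0')
      String.ofList padded.reverse

-- ===== PRECONDITION & SPEC =====
-- Pre_ excludes exactly: value < 0 or value not representable in `width` base-`len(digits)`
-- digits (A raises ValueError there), plus two degenerate corners on which A still returns
-- "" only for value = 0 but B's own algorithm raises: the empty alphabet (B evaluates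
-- digits[0] for padding → IndexError; A raises ZeroDivisionError anyway whenever width > 0)
-- and negative width (B's length fit-check raises ValueError where A's empty loop returns "").
def Pre_encode_pure_py (digits : String) (value : Int) (width : Int) : Prop :=
  digits.toList ≠ [] ∧ 0 ≤ width ∧ 0 ≤ value ∧
    value < (digits.toList.length : Int) ^ width.toNat
instance (digits : String) (value : Int) (width : Int) : Decidable (Pre_encode_pure_py digits value width) := by unfold Pre_encode_pure_py; infer_instance
def pvWitness_encode_pure_py : String × Int × Int := ("0123", 7, 3)

def Spec_encode_pure_py (digits : String) (value : Int) (width : Int) (out : String) : Prop := out = encode_pure_py_alt digits value width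
instance (digits : String) (value : Int) (width : Int) (out : String) : Decidable (Spec_encode_pure_py digits value width out) := by unfold Spec_encode_pure_py; infer_instance

-- ===== CLAIM (what is proved, stated in full; the proofs are below) =====
def Claim_equal_encode_pure_py : Prop := ∀ (digits : String) (value : Int) (width : Int), Dom_encode_pure_py digits value width → Pre_encode_pure_py digits value width → Spec_encode_pure_py digits value width (encode_pure_py digits value width)

-- ===== LEMMAS AND PROOFS =====

-- the digit character A writes for remainder r
def pvChr (digits : String) (base r : Int) : Char :=
  (PySem.Str.pyGet? digits (PySem.Int.mod r base)).getD '0'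

-- A's buffer content for m steps, MSB first
def pvRep (digits : String) (base : Int) (rem : Int) : Nat → List Char
  | 0 => []
  | m + 1 => pvRep digits base (PySem.Int.floordiv rem base) m ++ [pvChr digits base rem]

-- A's remainder after m steps
def pvIter (base rem : Int) : Nat → Int
  | 0 => rem
  | m + 1 => pvIter base (PySem.Int.floordiv rem base) m

theorem pvRep_length (digits : String) (base rem : Int) (m : Nat) :
    (pvRep digits base rem m).length = m := by
  induction m generalizing rem with
  | zero => rfl
  | succ m ih => simp [pvRep, ih]

-- characterisation of A's write-back loop
theorem pvFoldA (digits : String) (base : Int) (m : Nat) (buf : List Char) (rem : Int)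
    (hlen : m ≤ buf.length) :
    (PySem.List.pyRange ((m : Int) - 1) (-1) (-1)).foldl
        (fun (st : List Char × Int) idx =>
          (st.1.set idx.toNat ((PySem.Str.pyGet? digits (PySem.Int.mod st.2 base)).getD '0'),
           PySem.Int.floordiv st.2 base))
        (buf, rem)
      = (pvRep digits base rem m ++ buf.drop m, pvIter base rem m) := by
  induction m generalizing buf rem with
  | zero =>
      rw [PySem.List.pyRange_neg_one_eq_nil (by omega)]
      simp [pvRep, pvIter]
  | succ m ih =>
      rw [show (((m + 1 : Nat) : Int) - 1) = (m : Int) by push_cast; ring,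
          PySem.List.pyRange_neg_one_cons (by omega)]
      have hm : m < buf.length := by omega
      simp only [List.foldl_cons]
      rw [show ((m : Int).toNat) = m by omega]
      rw [show ((m : Int) - 1) = ((m : Nat) : Int) - 1 from rfl] at ih ⊢
      rw [ih _ _ (by simpa using Nat.le_of_lt hm)]
      rw [Prod.mk.injEq]
      refine ⟨?_, rfl⟩
      · show pvRep digits base (PySem.Int.floordiv rem base) m ++
            (buf.set m (pvChr digits base rem)).drop m = _
        have hdrop : (buf.set m (pvChr digits base rem)).drop m
            = pvChr digits base rem :: buf.drop (m + 1) := by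
          rw [List.drop_set]
          simp only [show ¬ m < m by omega, if_false, Nat.sub_self]
          rw [List.drop_eq_getElem_cons hm, List.set_cons_zero]
        rw [hdrop]
        simp [pvRep]

-- both remainder iterators and B's loop vanish at remainder 0
theorem pvIter_of_zero (base : Int) (m : Nat) : pvIter base 0 m = 0 := by
  induction m with
  | zero => rfl
  | succ m ih =>
      show pvIter base (PySem.Int.floordiv 0 base) m = 0
      simpa [PySem.Int.floordiv] using ih

theorem pvRep_of_zero (digits : String) (base : Int) (m : Nat) :
    pvRep digits base 0 m
      = List.replicate m ((PySem.Str.pyGet? digits 0).getD '0') := by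
  induction m with
  | zero => rfl
  | succ m ih =>
      show pvRep digits base (PySem.Int.floordiv 0 base) m ++ [pvChr digits base 0]
          = _
      rw [show PySem.Int.floordiv 0 base = 0 by simp [PySem.Int.floordiv],
          ih, show pvChr digits base 0 = (PySem.Str.pyGet? digits 0).getD '0' by
            simp [pvChr, PySem.Int.mod],
          List.replicate_succ']

theorem pvLoop_of_nonpos (digits : String) (base rem : Int) (h : ¬ 0 < rem) :
    pvDigitsLoop digits base rem = [] := by
  rw [pvDigitsLoop]; simp [h]

-- A's remainder vanishes when the value fits
theorem pvIter_zero (base : Int) (hb : 1 ≤ base) (m : Nat) (rem : Int)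
    (h0 : 0 ≤ rem) (hlt : rem < base ^ m) : pvIter base rem m = 0 := by
  induction m generalizing rem with
  | zero =>
      have : rem = 0 := by simp [pow_zero] at hlt; omega
      simp [this, pvIter_of_zero]
  | succ m ih =>
      show pvIter base (PySem.Int.floordiv rem base) m = 0
      rcases eq_or_lt_of_le h0 with h | hpos
      · rw [show rem = 0 from h.symm]
        rw [show PySem.Int.floordiv 0 base = 0 by simp [PySem.Int.floordiv]]
        exact pvIter_of_zero base m
      · have hb2 : 2 ≤ base := by
          by_contra hc
          have hb1 : base = 1 := by omega
          rw [hb1, one_pow] at hlt; omega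
        rw [PySem.Int.floordiv_eq_ediv_of_pos (by omega)]
        refine ih _ (Int.ediv_nonneg h0 (by omega)) ?_
        rw [Int.ediv_lt_iff_lt_mul (by omega)]
        calc rem < base ^ (m + 1) := hlt
          _ = base ^ m * base := by ring

-- A's MSB-first buffer is B's reversed digit list, left-padded with the zero digit
theorem pvLoop_pad (digits : String) (base : Int) (hb : 1 ≤ base) (m : Nat) (rem : Int)
    (h0 : 0 ≤ rem) (hlt : rem < base ^ m) :
    pvRep digits base rem m
      = List.replicate (m - (pvDigitsLoop digits base rem).length)
          ((PySem.Str.pyGet? digits 0).getD '0')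
        ++ (pvDigitsLoop digits base rem).reverse := by
  induction m generalizing rem with
  | zero =>
      have hz : rem = 0 := by simp [pow_zero] at hlt; omega
      rw [hz, pvLoop_of_nonpos digits base 0 (by omega)]
      simp [pvRep]
  | succ m ih =>
      rcases eq_or_lt_of_le h0 with h | hpos
      · rw [show rem = 0 from h.symm, pvLoop_of_nonpos digits base 0 (by omega)]
        simp [pvRep_of_zero]
      · have hb2 : 2 ≤ base := by
          by_contra hc
          have hb1 : base = 1 := by omega
          rw [hb1, one_pow] at hlt; omega
        have hloop : pvDigitsLoop digits base rem
            = pvChr digits base rem :: pvDigitsLoop digits base (PySem.Int.floordiv rem base) := by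
          rw [pvDigitsLoop]; simp [pvChr, hb2, hpos]
        have hdiv0 : 0 ≤ PySem.Int.floordiv rem base := by
          rw [PySem.Int.floordiv_eq_ediv_of_pos (by omega)]
          exact Int.ediv_nonneg h0 (by omega)
        have hdivlt : PySem.Int.floordiv rem base < base ^ m := by
          rw [PySem.Int.floordiv_eq_ediv_of_pos (by omega),
              Int.ediv_lt_iff_lt_mul (by omega)]
          calc rem < base ^ (m + 1) := hlt
            _ = base ^ m * base := by ring
        have ihx := ih (PySem.Int.floordiv rem base) hdiv0 hdivlt
        have hlen : (pvDigitsLoop digits base (PySem.Int.floordiv rem base)).length ≤ m := by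
          have h := congrArg List.length ihx
          rw [pvRep_length] at h
          simp [List.length_append, List.length_replicate] at h
          omega
        show pvRep digits base (PySem.Int.floordiv rem base) m ++ [pvChr digits base rem] = _
        rw [hloop, ihx]
        simp only [List.length_cons, List.reverse_cons, List.append_assoc]
        congr 2
        omega

-- length of B's digit list is bounded by m when the value fits
theorem pvLoop_len (digits : String) (base : Int) (hb : 1 ≤ base) (m : Nat) (rem : Int)
    (h0 : 0 ≤ rem) (hlt : rem < base ^ m) :
    (pvDigitsLoop digits base rem).length ≤ m := by
  have h := congrArg List.length (pvLoop_pad digits base hb m rem h0 hlt)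
  rw [pvRep_length] at h
  simp [List.length_append, List.length_replicate] at h
  omega

-- ===== VERDICT (by name: the statement is the Claim_ definition above) =====
theorem encode_pure_py_spec : Claim_equal_encode_pure_py := by
  intro digits value width _hdom hpre
  obtain ⟨hne, hw, hv, hfit⟩ := hpre
  show encode_pure_py digits value width = encode_pure_py_alt digits value width
  have hbase : PySem.Str.len digits = (digits.toList.length : Int) := by
    simp [PySem.Str.len_eq]
  set base : Int := (digits.toList.length : Int) with hbdef
  have hb1 : 1 ≤ base := by
    have : digits.toList.length ≠ 0 := by simpa using hne
    omega
  set m : Nat := width.toNat with hmdef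
  have hwm : width = (m : Int) := by omega
  have hvneg : ¬ value < 0 := by omega
  have hlt : value < base ^ m := hfit
  have hiter := pvIter_zero base hb1 m value hv hlt
  have hpad := pvLoop_pad digits base hb1 m value hv hlt
  have hlen := pvLoop_len digits base hb1 m value hv hlt
  have hA : encode_pure_py digits value width
      = String.ofList (pvRep digits base value m) := by
    unfold encode_pure_py
    rw [if_neg hvneg]
    simp only [hbase]
    rw [show width - 1 = (m : Int) - 1 by omega,
        pvFoldA digits base m (List.replicate width.toNat '0') value
          (by simp [hmdef])]
    simp only [hiter, ne_eq, not_true_eq_false]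
    rw [show width.toNat = m from rfl, List.drop_replicate]
    simp
  have hB : encode_pure_py_alt digits value width
      = String.ofList (pvRep digits base value m) := by
    unfold encode_pure_py_alt
    rw [if_neg hvneg]
    simp only [hbase]
    rw [if_neg (by omega)]
    rw [hpad, List.reverse_append, List.reverse_replicate]
    congr 3
    omega
  rw [hA, hB]
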